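-- pv_equiv track=rewrite | github.com/Armmy2530/CU_Comprog_grader | 2566/2566_2_Quiz_3_2/2566_2_Quiz_3_2.py | count_friends
-- ===== SOURCE A (Python) =====
-- def count_friends(data, names):
--     names.sort()
--     ans = []
--     for i in names:
--         temp = []
--         for j in data:
--             if i in j:
--                 j = sorted(j)
--                 if j not in temp:
--                     temp.append(j)
--         ans.append(tuple([i,len(temp)]))
--     return ans
-- ===== SOURCE B (Python) =====
-- def count_friends(data, names):
--     names.sort()
--     groups = {tuple(sorted(g)) for g in data}
--     counts = {}
--     for g in groups:
--         for m in set(g):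
--             counts[m] = counts.get(m, 0) + 1
--     return [(n, counts.get(n, 0)) for n in names]
-- ===== Notes on version B (the rewrite author's own statement) =====
-- stated objective: faster
-- what changed: B dedups the groups once into a set of sorted tuples and tallies each member into a dict, instead of re-scanning and re-deduplicating all groups separately for every name.
import Mathlib
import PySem

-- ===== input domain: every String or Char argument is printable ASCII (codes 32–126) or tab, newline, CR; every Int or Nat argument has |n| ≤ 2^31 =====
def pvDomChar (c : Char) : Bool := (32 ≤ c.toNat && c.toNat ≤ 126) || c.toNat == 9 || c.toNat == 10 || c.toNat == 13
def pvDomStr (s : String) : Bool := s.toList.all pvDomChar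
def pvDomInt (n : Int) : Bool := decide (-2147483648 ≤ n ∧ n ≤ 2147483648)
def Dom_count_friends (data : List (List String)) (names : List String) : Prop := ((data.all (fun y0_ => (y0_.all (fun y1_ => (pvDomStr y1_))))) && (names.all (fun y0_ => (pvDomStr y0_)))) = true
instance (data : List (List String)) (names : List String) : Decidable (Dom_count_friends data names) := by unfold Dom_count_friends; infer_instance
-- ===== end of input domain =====

-- B replaces A's per-name rescan-and-dedup of all groups by one global dedup of the
-- groups plus a per-member tally dict (objective: faster, asymptotically fewer passes).
-- Both A and B sort `names` in place; the equivalence proved is about the return value.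

-- ===== PORT A =====
def count_friends (data : List (List String)) (names : List String) : List (String × Int) :=
  let names' := PySem.List.sorted names (fun x => x) false
  names'.foldl (fun ans i =>
    let temp : List (List String) := data.foldl (fun temp j =>
      if i ∈ j then
        let j' := PySem.List.sorted j (fun x => x) false
        if j' ∉ temp then temp ++ [j'] else temp
      else temp) []
    ans ++ [(i, (temp.length : Int))]) []

-- ===== PORT B =====
def count_friends_alt (data : List (List String)) (names : List String) : List (String × Int) :=
  let names' := PySem.List.sorted names (fun x => x) false
  let groups : PySem.Set (List String) :=
    PySem.Set.ofList (data.map (fun g => PySem.List.sorted g (fun x => x) false))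
  let counts : PySem.Dict String Int :=
    groups.foldl (fun d g =>
      (PySem.Set.ofList g).foldl (fun d m => d.modify m 0 (· + 1)) d) PySem.Dict.empty
  names'.map (fun n => (n, counts.getD n 0))

-- ===== PRECONDITION & SPEC =====
def Spec_count_friends (data : List (List String)) (names : List String) (out : List (String × Int)) : Prop := out = count_friends_alt data names
instance (data : List (List String)) (names : List String) (out : List (String × Int)) : Decidable (Spec_count_friends data names out) := by unfold Spec_count_friends; infer_instance

-- ===== CLAIM (what is proved, stated in full; the proofs are below) =====
def Claim_equal_count_friends : Prop := ∀ (data : List (List String)) (names : List String), Dom_count_friends data names → Spec_count_friends data names (count_friends data names)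

-- ===== LEMMAS AND PROOFS =====


theorem tempLoop_eq_foldl_add (i : String) (data : List (List String)) (acc : PySem.Set (List String)) :
    data.foldl (fun temp j =>
      if i ∈ j then
        let j' := PySem.List.sorted j (fun x => x) false
        if j' ∉ temp then temp ++ [j'] else temp
      else temp) acc =
    ((data.filter (fun j => decide (i ∈ j))).map (fun g => PySem.List.sorted g (fun x => x) false)).foldl
      PySem.Set.add acc := by
  induction data generalizing acc with
  | nil => rfl
  | cons j rest ih =>
    by_cases h : i ∈ j
    · simp only [List.foldl_cons, List.filter_cons, h, if_pos, decide_true, List.map_cons]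
      rw [ih]
      congr 1
      rw [PySem.Set.add_eq_ite]
      by_cases hm : PySem.List.sorted j (fun x => x) false ∈ acc <;> simp [hm]
    · simp only [List.foldl_cons, List.filter_cons, h, decide_false]
      simpa using ih acc

theorem ofList_filter {α : Type} [BEq α] [LawfulBEq α] (p : α → Bool) (l : List α) :
    PySem.Set.ofList (l.filter p) = (PySem.Set.ofList l).filter p := by
  induction l using List.reverseRecOn with
  | nil => rfl
  | append_singleton l x ih =>
    rw [List.filter_append, PySem.Set.ofList_append_singleton, PySem.Set.add_eq_ite]
    by_cases hp : p x
    · simp only [List.filter_cons, hp, if_pos, List.filter_nil,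
        PySem.Set.ofList_append_singleton, PySem.Set.add_eq_ite, PySem.Set.mem_ofList,
        List.mem_filter]
      by_cases hm : x ∈ l
      · simp [hm, ih]
      · simp [hm, hp, ih, List.filter_append]
    · have hp' : p x = false := by simpa using hp
      by_cases hm : x ∈ PySem.Set.ofList l
      · simp [hp', hm, ih]
      · simp [hp', hm, ih, List.filter_append]


theorem counts_getD (n : String) (S : List (List String)) (d : PySem.Dict String Int) :
    (S.foldl (fun d g => (PySem.Set.ofList g).foldl (fun d m => d.modify m 0 (· + 1)) d) d).getD n 0
      = d.getD n 0 + S.countP (fun g => decide (n ∈ g)) := by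
  induction S generalizing d with
  | nil => simp
  | cons g rest ih =>
    rw [List.foldl_cons, ih, PySem.Dict.getD_foldl_modify_add_one]
    have hc : (PySem.Set.ofList g).count n = if n ∈ g then 1 else 0 := by
      by_cases hm : n ∈ g
      · simp [hm, List.count_eq_one_of_mem (PySem.Set.nodup_ofList g)
          ((PySem.Set.mem_ofList g n).mpr hm)]
      · simp [hm, List.count_eq_zero.mpr (fun h => hm ((PySem.Set.mem_ofList g n).mp h))]
    rw [List.countP_cons, hc]
    by_cases hm : n ∈ g <;> simp [hm] <;> ring

theorem foldl_append_map {α β : Type} (f : α → β) (l : List α) (acc : List β) :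
    l.foldl (fun ans i => ans ++ [f i]) acc = acc ++ l.map f := by
  induction l generalizing acc with
  | nil => simp
  | cons x xs ih => simp [ih]

-- ===== VERDICT (by name: the statement is the Claim_ definition above) =====
theorem count_friends_spec : Claim_equal_count_friends := by
  intro data names _
  unfold Spec_count_friends count_friends count_friends_alt
  rw [foldl_append_map]
  simp only [List.nil_append]
  apply List.map_congr_left
  intro n _
  refine Prod.ext rfl ?_
  rw [tempLoop_eq_foldl_add, counts_getD, ← PySem.Set.ofList_eq_foldl]
  have hfc : (data.filter ((fun g => decide (n ∈ g)) ∘ fun g => PySem.List.sorted g (fun x => x) false))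
      = data.filter (fun j => decide (n ∈ j)) := by
    apply List.filter_congr
    intro j _
    simp [PySem.List.mem_sorted]
  rw [← hfc, ← List.filter_map, ofList_filter, List.countP_eq_length_filter]
  simp
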